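-- pv_equiv track=rewrite | github.com/homelanmder/supershellUpgrade | flask/module/client.py | handle_clients
-- ===== SOURCE A (Python) =====
-- def sorttime(dic):
--     '''
--         嵌套列表字典排序
--     '''
--     return dic['time']
--
-- def handle_clients(source_list, search_text, filter_choose):
--     '''
--         对全部客户端数据进行处理，返回处理后的客户端数据（搜索、筛选和排序）
--     '''
--     # 数据搜索
--     if search_text != '':
--         search_list = []
--         for l in source_list:
--             for e in l.values():
--                 if search_text.lower() in e.lower():
--                     search_list.append(l)
--                     break
--         source_list = search_list
--
--     # 数据筛选
--     if filter_choose != {}: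
--         # k是attribution、os、arch、version、status和group
--         for k in filter_choose.keys():
--             filter_list = []
--             # c是6个筛选项列表中的每个值
--             for c in filter_choose[k]:
--                 # s是客户端list中的每一个条目
--                 for s in source_list:
--                     if c == s[k]:
--                         filter_list.append(s)
--             source_list = filter_list
--
--     # 嵌套列表字典排序
--     source_list.sort(key=sorttime, reverse=True)
--     return source_list
-- ===== SOURCE B (Python) =====
-- def handle_clients(source_list, search_text, filter_choose):
--     # Search: keep records where any value contains the needle (case-insensitive).
--     if search_text != '':
--         needle = search_text.lower()
--         source_list = [r for r in source_list
--                        if any(needle in v.lower() for v in r.values())]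
--     # Filter: one bucketing pass per key instead of one scan per chosen value.
--     for k, choices in filter_choose.items():
--         if not choices:
--             source_list = []
--             continue
--         buckets = {}
--         for r in source_list:
--             buckets.setdefault(r[k], []).append(r)
--         grouped = []
--         for c in choices:
--             grouped.extend(buckets.get(c, []))
--         source_list = grouped
--     # Sort by 'time', descending (stable); returns a new list.
--     return sorted(source_list, key=lambda d: d['time'], reverse=True)
-- ===== Notes on version B (the rewrite author's own statement) =====
-- stated objective: faster
-- what changed: The filter phase no longer rescans the whole client list once per chosen value: B makes one bucketing pass per filter key (dict value -> records) and concatenates the chosen buckets; search becomes a one-pass comprehension and the in-place sort becomes sorted().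
import Mathlib
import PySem

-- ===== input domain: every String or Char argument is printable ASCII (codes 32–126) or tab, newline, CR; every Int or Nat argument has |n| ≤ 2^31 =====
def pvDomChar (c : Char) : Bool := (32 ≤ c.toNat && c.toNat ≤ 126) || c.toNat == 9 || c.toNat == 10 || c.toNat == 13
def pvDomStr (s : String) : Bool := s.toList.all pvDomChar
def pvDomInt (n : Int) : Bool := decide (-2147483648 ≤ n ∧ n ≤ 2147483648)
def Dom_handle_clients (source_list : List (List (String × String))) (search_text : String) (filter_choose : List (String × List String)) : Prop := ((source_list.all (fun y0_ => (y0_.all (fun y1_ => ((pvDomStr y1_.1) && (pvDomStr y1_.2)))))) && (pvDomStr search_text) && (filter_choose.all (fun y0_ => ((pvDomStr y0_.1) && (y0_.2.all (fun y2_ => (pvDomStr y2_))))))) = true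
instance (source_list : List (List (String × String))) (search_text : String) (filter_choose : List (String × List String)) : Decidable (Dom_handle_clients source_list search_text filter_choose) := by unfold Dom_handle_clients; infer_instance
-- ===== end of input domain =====

-- B replaces A's per-chosen-value rescans of the client list by one bucketing pass per filter
-- key (dict value -> matching records) and concatenates the chosen buckets; search and sort are
-- one-pass comprehension / sorted(). Return values agree; A additionally sorts the caller's list
-- in place (a side effect B does not reproduce; only the return value is compared here).

-- ===== PORT A =====
-- record dicts are modelled as PySem.Dict built from the assoc lists; missing-key lookups
-- (KeyError in Python) are excluded by Pre_ below, so the "" default is never reached there.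
def pvSearchHit (needle : String) : List String → Bool
  | [] => false
  | e :: rest => if PySem.Str.isIn needle (PySem.Str.lower e) then true else pvSearchHit needle rest

def handle_clients (source_list : List (List (String × String))) (search_text : String) (filter_choose : List (String × List String)) : List (List (String × String)) :=
  let src := source_list.map (fun l => PySem.Dict.ofList l)
  let fd := PySem.Dict.ofList filter_choose
  -- search phase: 'for l: for e in l.values(): if hit: append l; break'
  let src1 := if search_text = "" then src else
    src.foldl (fun acc l => if pvSearchHit (PySem.Str.lower search_text) l.values then acc ++ [l] else acc) []
  -- filter phase: nested loops over keys / chosen values / current list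
  let src2 := if fd.items = [] then src1 else
    fd.keys.foldl (fun cur k =>
      (fd.getD k []).foldl (fun fl c =>
        cur.foldl (fun fl s => if c == s.getD k "" then fl ++ [s] else fl) fl) []) src1
  (PySem.List.sorted src2 (fun d => d.getD "time" "") true).map PySem.Dict.items

-- ===== PORT B =====
def handle_clients_alt (source_list : List (List (String × String))) (search_text : String) (filter_choose : List (String × List String)) : List (List (String × String)) :=
  let src := source_list.map (fun l => PySem.Dict.ofList l)
  let src1 := if search_text = "" then src else
    let needle := PySem.Str.lower search_text
    src.filter (fun r => r.values.any (fun v => PySem.Str.isIn needle (PySem.Str.lower v)))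
  let src2 := (PySem.Dict.ofList filter_choose).items.foldl (fun cur kc =>
    if kc.2.isEmpty then []
    else
      let buckets := cur.foldl (fun b r => b.modify (r.getD kc.1 "") [] (· ++ [r])) PySem.Dict.empty
      kc.2.foldl (fun res c => res ++ buckets.getD c []) []) src1
  (PySem.List.sorted src2 (fun d => d.getD "time" "") true).map PySem.Dict.items

-- ===== PRECONDITION & SPEC =====
-- Pre_ excludes exactly the inputs where A raises KeyError: during the filter phase a record
-- still in the running list lacks the current filter key, or a record reaching the final sort
-- lacks 'time'. (The running list before key i is: records matching the search that passed all
-- earlier keys, provided no earlier key had an empty chosen-value list.)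
def pvMatch (search_text : String) (l : PySem.Dict String String) : Bool :=
  search_text == "" || l.values.any (fun v => PySem.Str.isIn (PySem.Str.lower search_text) (PySem.Str.lower v))

def pvPass (l : PySem.Dict String String) (p : String × List String) : Bool :=
  (l.get? p.1).any (fun v => p.2.contains v)

def Pre_handle_clients (source_list : List (List (String × String))) (search_text : String) (filter_choose : List (String × List String)) : Prop :=
  (∀ i, i < (PySem.Dict.ofList filter_choose).items.length →
    ((PySem.Dict.ofList filter_choose).items[i]!.2 ≠ [] ∧
      ∀ j, j < i → (PySem.Dict.ofList filter_choose).items[j]!.2 ≠ []) →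
    ∀ l ∈ source_list, pvMatch search_text (PySem.Dict.ofList l) = true →
      (∀ j, j < i → pvPass (PySem.Dict.ofList l) (PySem.Dict.ofList filter_choose).items[j]! = true) →
      (PySem.Dict.ofList l).contains (PySem.Dict.ofList filter_choose).items[i]!.1 = true) ∧
  ((∀ j, j < (PySem.Dict.ofList filter_choose).items.length →
      (PySem.Dict.ofList filter_choose).items[j]!.2 ≠ []) →
    ∀ l ∈ source_list, pvMatch search_text (PySem.Dict.ofList l) = true →
      (∀ j, j < (PySem.Dict.ofList filter_choose).items.length →
        pvPass (PySem.Dict.ofList l) (PySem.Dict.ofList filter_choose).items[j]! = true) →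
      (PySem.Dict.ofList l).contains "time" = true)
instance (source_list : List (List (String × String))) (search_text : String) (filter_choose : List (String × List String)) : Decidable (Pre_handle_clients source_list search_text filter_choose) := by unfold Pre_handle_clients; infer_instance

def pvWitness_handle_clients : (List (List (String × String))) × String × (List (String × List String)) :=
  ([[("time", "1"), ("os", "linux")], [("time", "2"), ("os", "win")]], "i", [("os", ["linux", "win", "linux"])])

def Spec_handle_clients (source_list : List (List (String × String))) (search_text : String) (filter_choose : List (String × List String)) (out : List (List (String × String))) : Prop := out = handle_clients_alt source_list search_text filter_choose
instance (source_list : List (List (String × String))) (search_text : String) (filter_choose : List (String × List String)) (out : List (List (String × String))) : Decidable (Spec_handle_clients source_list search_text filter_choose out) := by unfold Spec_handle_clients; infer_instance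

-- ===== CLAIM (what is proved, stated in full; the proofs are below) =====
def Claim_equal_handle_clients : Prop := ∀ (source_list : List (List (String × String))) (search_text : String) (filter_choose : List (String × List String)), Dom_handle_clients source_list search_text filter_choose → Pre_handle_clients source_list search_text filter_choose → Spec_handle_clients source_list search_text filter_choose (handle_clients source_list search_text filter_choose)

-- ===== LEMMAS AND PROOFS =====

-- A's search inner loop (append + break) is an 'any' over the values
theorem pvSearchHit_eq_any (needle : String) (vs : List String) :
    pvSearchHit needle vs = vs.any (fun v => PySem.Str.isIn needle (PySem.Str.lower v)) := by
  induction vs with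
  | nil => rfl
  | cons e rest ih =>
    simp only [pvSearchHit, List.any_cons, ih]
    cases PySem.Str.isIn needle (PySem.Str.lower e) <;> simp

-- B's bucketing pass read back at c is the filter of the current list at c
theorem pvBuckets_getD (g : PySem.Dict String String → String) (cur : List (PySem.Dict String String)) (c : String) :
    (cur.foldl (fun b r => b.modify (g r) [] (· ++ [r])) PySem.Dict.empty).getD c []
      = cur.filter (fun r => g r == c) := by
  have h : cur.foldl (fun b r => b.modify (g r) [] (· ++ [r])) PySem.Dict.empty
      = (cur.map (fun r => (g r, r))).foldl (fun d p => d.modify p.1 [] (· ++ [p.2])) PySem.Dict.empty := by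
    rw [List.foldl_map]
  rw [h, PySem.Dict.getD_foldl_modify_append]
  simp [PySem.Dict.getD_empty, List.filter_map, Function.comp_def]

-- one filter key: A's two nested scans equal B's bucket concatenation
theorem pvKeyStep (cur : List (PySem.Dict String String)) (k : String) (choices : List String) :
    choices.foldl (fun fl c =>
        cur.foldl (fun fl s => if c == s.getD k "" then fl ++ [s] else fl) fl) []
      = (if choices.isEmpty then []
         else
           let buckets := cur.foldl (fun b r => b.modify (r.getD k "") [] (· ++ [r])) PySem.Dict.empty
           choices.foldl (fun res c => res ++ buckets.getD c []) []) := by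
  have ha : ∀ (fl : List (PySem.Dict String String)) (c : String),
      cur.foldl (fun fl s => if c == s.getD k "" then fl ++ [s] else fl) fl
        = fl ++ cur.filter (fun s => c == s.getD k "") := by
    intro fl c; exact PySem.List.foldl_append_if_eq_filter _ _ _
  cases choices with
  | nil => simp
  | cons c0 cs =>
    rw [if_neg (by simp)]
    have e1 : (c0 :: cs).foldl (fun fl c =>
        cur.foldl (fun fl s => if c == s.getD k "" then fl ++ [s] else fl) fl) []
        = (c0 :: cs).foldl (fun fl c => fl ++ cur.filter (fun s => c == s.getD k "")) [] := by
      exact PySem.List.foldl_congr_mem _ _ _ [] (fun acc x _ => ha acc x)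
    rw [e1, PySem.List.foldl_append_eq_flatMap, PySem.List.foldl_append_eq_flatMap]
    simp only [List.nil_append]
    apply List.flatMap_congr
    intro c _
    rw [pvBuckets_getD]
    apply List.filter_congr
    intro s _
    simp [eq_comm]

-- A's search pass equals B's filter
theorem pvSearchPhase (src : List (PySem.Dict String String)) (needle : String) :
    src.foldl (fun acc l => if pvSearchHit needle l.values then acc ++ [l] else acc) []
      = src.filter (fun r => r.values.any (fun v => PySem.Str.isIn needle (PySem.Str.lower v))) := by
  rw [PySem.List.foldl_append_if_eq_filter]
  simp only [List.nil_append]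
  exact List.filter_congr (fun r _ => pvSearchHit_eq_any needle r.values)

-- A's filter phase (loop over keys, rescanning per chosen value) equals B's bucket folds
theorem pvFilterPhase (fd : PySem.Dict String (List String)) (hnd : fd.keys.Nodup) (x : List (PySem.Dict String String)) :
    (if fd.items = [] then x else
      fd.keys.foldl (fun cur k =>
        (fd.getD k []).foldl (fun fl c =>
          cur.foldl (fun fl s => if c == s.getD k "" then fl ++ [s] else fl) fl) []) x)
      = fd.items.foldl (fun cur kc =>
          if kc.2.isEmpty then []
          else
            let buckets := cur.foldl (fun b r => b.modify (r.getD kc.1 "") [] (· ++ [r])) PySem.Dict.empty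
            kc.2.foldl (fun res c => res ++ buckets.getD c []) []) x := by
  by_cases h : fd.items = []
  · rw [if_pos h, h]; rfl
  · rw [if_neg h]
    have hk : fd.keys = fd.items.map (·.1) := rfl
    rw [hk, List.foldl_map]
    apply PySem.List.foldl_congr_mem
    intro cur p hp
    have hget : fd.getD p.1 [] = p.2 :=
      PySem.Dict.getD_of_mem_items fd (by simpa using hp) hnd []
    rw [hget, pvKeyStep]

-- ===== VERDICT (by name: the statement is the Claim_ definition above) =====
theorem handle_clients_spec : Claim_equal_handle_clients := by
  intro source_list search_text filter_choose _ _
  unfold Spec_handle_clients handle_clients handle_clients_alt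
  simp only []
  rw [pvSearchPhase, ← pvFilterPhase _ (PySem.Dict.nodup_keys_ofList filter_choose)]
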